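-- pv_equiv track=rewrite | github.com/Ehsan-aghapour/CO-UP-Profiling | Profiling/utils.py | count_consecutive_N
-- ===== SOURCE A (Python) =====
-- def count_consecutive_N(cmps, i):
--     # Check if the character at index i is 'N'
--     if cmps[i] != 'N':
--         return 0
--
--     # Initialize count
--     count = 1  # Count the 'N' at index i
--
--     # Count consecutive 'N's to the left of i
--     left_index = i - 1
--     while left_index >= 0 and cmps[left_index] == 'N':
--         count += 1
--         left_index -= 1
--
--     # Count consecutive 'N's to the right of i
--     right_index = i + 1
--     while right_index < len(cmps) and cmps[right_index] == 'N':
--         count += 1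
--         right_index += 1
--
--     return count
-- ===== SOURCE B (Python) =====
-- def count_consecutive_N(cmps, i):
--     if cmps[i] != 'N':
--         return 0
--     # Single left-to-right scan over run boundaries: `start` is the start of the
--     # current maximal run of 'N's; when a run ends before a non-'N' at k, if i lies
--     # in it return its length k - start, else restart after k.
--     start = 0
--     for k in range(len(cmps)):
--         if cmps[k] != 'N':
--             if start <= i < k:
--                 return k - start
--             start = k + 1
--     return len(cmps) - start
-- ===== Notes on version B (the rewrite author's own statement) =====
-- stated objective: alternative
-- what changed: B replaces A's two bidirectional walks centred on i with a single left-to-right scan over run boundaries: it tracks the start of the current maximal 'N'-run and returns that run's length when the run containing i closes (or at end of string).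
-- outside the precondition, e.g. on count_consecutive_N('NN', -1): A returns 3, B returns 2
import Mathlib
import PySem

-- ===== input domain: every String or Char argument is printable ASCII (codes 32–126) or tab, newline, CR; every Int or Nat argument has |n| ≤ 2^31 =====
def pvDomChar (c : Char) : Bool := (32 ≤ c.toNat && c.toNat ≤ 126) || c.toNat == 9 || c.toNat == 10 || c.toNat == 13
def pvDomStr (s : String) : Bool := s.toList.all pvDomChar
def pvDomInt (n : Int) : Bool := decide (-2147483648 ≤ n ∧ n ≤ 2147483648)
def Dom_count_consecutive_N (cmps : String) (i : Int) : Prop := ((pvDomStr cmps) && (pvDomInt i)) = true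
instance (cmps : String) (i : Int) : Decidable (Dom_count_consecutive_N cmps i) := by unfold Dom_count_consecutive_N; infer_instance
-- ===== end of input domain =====

-- B replaces A's two bidirectional walks centred on i by a single left-to-right scan
-- over maximal-'N'-run boundaries (objective: alternative).


-- ===== PORT A =====
-- while left_index >= 0 and cmps[left_index] == 'N': count += 1; left_index -= 1
def pvCountLeft (cs : List Char) (j : Int) : Int :=
  if h : 0 ≤ j ∧ PySem.List.pyGet? cs j = some 'N' then
    1 + pvCountLeft cs (j - 1)
  else 0
termination_by (j + 1).toNat
decreasing_by omega

-- while right_index < len(cmps) and cmps[right_index] == 'N': count += 1; right_index += 1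
def pvCountRight (cs : List Char) (j : Int) : Int :=
  if h : j < (cs.length : Int) ∧ PySem.List.pyGet? cs j = some 'N' then
    1 + pvCountRight cs (j + 1)
  else 0
termination_by ((cs.length : Int) - j).toNat
decreasing_by omega

def count_consecutive_N (cmps : String) (i : Int) : Int :=
  match PySem.Str.pyGet? cmps i with
  | none => 0  -- cmps[i] raises IndexError here; excluded by Pre_
  | some c =>
    if c ≠ 'N' then 0
    else 1 + pvCountLeft cmps.toList (i - 1) + pvCountRight cmps.toList (i + 1)

-- ===== PORT B =====
-- for k in range(len(cmps)): … with accumulator `start` and an early return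
def pvRunScan (cs : List Char) (i : Int) (start k : Nat) : Int :=
  if h : k < cs.length then
    if cs[k] ≠ 'N' then
      if (start : Int) ≤ i ∧ i < (k : Int) then (k : Int) - (start : Int)
      else pvRunScan cs i (k + 1) (k + 1)
    else pvRunScan cs i start (k + 1)
  else (cs.length : Int) - (start : Int)
termination_by cs.length - k

def count_consecutive_N_alt (cmps : String) (i : Int) : Int :=
  match PySem.Str.pyGet? cmps i with
  | none => 0  -- cmps[i] raises IndexError here; excluded by Pre_
  | some c =>
    if c ≠ 'N' then 0
    else pvRunScan cmps.toList i 0 0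

-- ===== PRECONDITION & SPEC =====
-- Pre_ excludes i out of range, where A raises IndexError, and negative in-range i pointing
-- at an 'N', where both A's value (a wraparound re-count via Python's negative indexing) and
-- B's value (the run at the end of the scan) are artefacts no caller would specify.
def Pre_count_consecutive_N (cmps : String) (i : Int) : Prop :=
  -(cmps.toList.length : Int) ≤ i ∧ i < (cmps.toList.length : Int) ∧
    (0 ≤ i ∨ PySem.List.pyGet? cmps.toList i ≠ some 'N')
instance (cmps : String) (i : Int) : Decidable (Pre_count_consecutive_N cmps i) := by
  unfold Pre_count_consecutive_N; infer_instance

def pvWitness_count_consecutive_N : String × Int := ("NXN", 0)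

def Spec_count_consecutive_N (cmps : String) (i : Int) (out : Int) : Prop := out = count_consecutive_N_alt cmps i
instance (cmps : String) (i : Int) (out : Int) : Decidable (Spec_count_consecutive_N cmps i out) := by unfold Spec_count_consecutive_N; infer_instance

-- ===== CLAIM (what is proved, stated in full; the proofs are below) =====
def Claim_equal_count_consecutive_N : Prop := ∀ (cmps : String) (i : Int), Dom_count_consecutive_N cmps i → Pre_count_consecutive_N cmps i → Spec_count_consecutive_N cmps i (count_consecutive_N cmps i)

-- ===== LEMMAS AND PROOFS =====

-- A's left walk from j counts down to the run start: if every index in [start, j] holds 'N'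
-- and the run cannot extend left of start, it returns j + 1 - start.
theorem pvCountLeft_run (cs : List Char) (start : Nat)
    (hb : start = 0 ∨ cs[start - 1]? ≠ some 'N') :
    ∀ j : Int, (start : Int) ≤ j + 1 →
    (∀ m : Nat, start ≤ m → (m : Int) ≤ j → cs[m]? = some 'N') →
    pvCountLeft cs j = j + 1 - start := by
  intro j
  induction j using pvCountLeft.induct cs with
  | case1 j h ih =>
    intro hstart hN
    obtain ⟨h0, hget⟩ := h
    have hsj : (start : Int) ≤ j := by
      by_contra hc
      have hs1 : 1 ≤ start := by omega
      rcases hb with h0' | hne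
      · omega
      · apply hne
        have hj : (start - 1 : Nat) = j.toNat := by omega
        rw [PySem.List.pyGet?_of_nonneg cs h0] at hget
        rw [hj]
        exact hget
    have := ih (by omega) (fun m hm1 hm2 => hN m hm1 (by omega))
    rw [pvCountLeft, dif_pos ⟨h0, hget⟩, this]
    omega
  | case2 j h =>
    intro hstart hN
    rw [pvCountLeft, dif_neg h]
    by_cases hsj : (start : Int) ≤ j
    · exfalso
      have h0 : 0 ≤ j := by omega
      apply h
      refine ⟨h0, ?_⟩
      rw [PySem.List.pyGet?_of_nonneg cs h0]
      have := hN j.toNat (by omega) (by omega)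
      simpa using this
    · omega

-- A's right walk from j counts up to the run end e: if every index in [j, e) holds 'N'
-- and the run stops at e, it returns e - j.
theorem pvCountRight_run (cs : List Char) (e : Nat) (hel : e ≤ cs.length)
    (hb : e = cs.length ∨ cs[e]? ≠ some 'N') :
    ∀ j : Int, 0 ≤ j → j ≤ (e : Int) →
    (∀ m : Nat, j ≤ (m : Int) → m < e → cs[m]? = some 'N') →
    pvCountRight cs j = e - j := by
  intro j
  induction j using pvCountRight.induct cs with
  | case1 j h ih =>
    intro h0 hje hN
    obtain ⟨hlt, hget⟩ := h
    have hje' : j < (e : Int) := by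
      by_contra hc
      have he2 : e = j.toNat := by omega
      rcases hb with hel' | hne
      · omega
      · apply hne
        rw [PySem.List.pyGet?_of_nonneg cs h0] at hget
        rw [he2]; exact hget
    have := ih (by omega) (by omega) (fun m hm1 hm2 => hN m (by omega) hm2)
    rw [pvCountRight, dif_pos ⟨hlt, hget⟩, this]
    omega
  | case2 j h =>
    intro h0 hje hN
    rw [pvCountRight, dif_neg h]
    by_cases hje' : j < (e : Int)
    · exfalso
      apply h
      refine ⟨by omega, ?_⟩
      rw [PySem.List.pyGet?_of_nonneg cs h0]
      have := hN j.toNat (by omega) (by omega)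
      simpa using this
    · omega

-- B's scan invariant: `start` begins the current (possibly empty) maximal run of 'N's,
-- i lies at or beyond start, and i holds an 'N'; then the scan returns the length of
-- i's run, which is exactly A's 1 + left walk + right walk.
theorem pvRunScan_eq (cs : List Char) (i : Int)
    (hi0 : 0 ≤ i) (hil : i < (cs.length : Int)) (hiN : cs[i.toNat]? = some 'N') :
    ∀ start k : Nat, start ≤ k → k ≤ cs.length → (start : Int) ≤ i →
    (∀ m : Nat, start ≤ m → m < k → cs[m]? = some 'N') →
    (start = 0 ∨ cs[start - 1]? ≠ some 'N') →
    pvRunScan cs i start k = 1 + pvCountLeft cs (i - 1) + pvCountRight cs (i + 1) := by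
  intro start k
  induction start, k using pvRunScan.induct cs i with
  | case1 start k hk hne hcond =>
    intro hsk hkl hsi hrun hb
    -- run [start, k) closed by a non-'N' at k, and i is inside it: return k - start
    obtain ⟨_, hik⟩ := hcond
    have hL := pvCountLeft_run cs start hb (i - 1) (by omega)
      (fun m hm1 hm2 => hrun m hm1 (by omega))
    have hR := pvCountRight_run cs k hkl
      (Or.inr (by simp only [ne_eq]; intro hc; exact hne (by simpa using (List.getElem?_eq_some_iff.mp hc).choose_spec ▸ rfl)))
      (i + 1) (by omega) (by omega) (fun m hm1 hm2 => hrun m (by omega) hm2)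
    rw [pvRunScan, dif_pos hk, if_pos hne, if_pos ⟨hsi, hik⟩, hL, hR]
    omega
  | case2 start k hk hne hcond ih =>
    intro hsk hkl hsi hrun hb
    -- run [start, k) closed but i beyond it: i > k (i ≠ k since cs[k] ≠ 'N' = cs[i])
    have hnk : ¬ i < (k : Int) := fun hq => hcond ⟨hsi, hq⟩
    have hik : (k : Int) < i := by
      by_contra hq2
      have hieq : i.toNat = k := by omega
      apply hne
      have h2 : cs[k]? = some 'N' := by rw [← hieq]; exact hiN
      rw [List.getElem?_eq_getElem hk] at h2
      exact Option.some.inj h2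
    rw [pvRunScan, dif_pos hk, if_pos hne, if_neg hcond]
    exact ih le_rfl (by omega) (by omega)
      (fun m hm1 hm2 => absurd hm2 (by omega))
      (Or.inr (by
        show cs[k]? ≠ some 'N'
        rw [List.getElem?_eq_getElem hk]
        intro hc2
        exact hne (Option.some.inj hc2)))
  | case3 start k hk hne ih =>
    intro hsk hkl hsi hrun hb
    -- cs[k] = 'N': the current run extends past k
    simp only [ne_eq, not_not] at hne
    rw [pvRunScan, dif_pos hk, if_neg (by simp [hne])]
    refine ih (by omega) (by omega) hsi ?_ hb
    intro m hm1 hm2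
    rcases Nat.lt_or_ge m k with h | h
    · exact hrun m hm1 h
    · have hmk : m = k := by omega
      rw [hmk, List.getElem?_eq_getElem hk, hne]
  | case4 start k hk =>
    intro hsk hkl hsi hrun hb
    -- end of string: i's run is [start, len)
    have hkl' : k = cs.length := by omega
    subst hkl'
    have hL := pvCountLeft_run cs start hb (i - 1) (by omega)
      (fun m hm1 hm2 => hrun m hm1 (by omega))
    have hR := pvCountRight_run cs cs.length le_rfl (Or.inl rfl)
      (i + 1) (by omega) (by omega) (fun m hm1 hm2 => hrun m (by omega) hm2)
    rw [pvRunScan, dif_neg hk, hL, hR]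
    omega

-- ===== VERDICT (by name: the statement is the Claim_ definition above) =====
theorem count_consecutive_N_spec : Claim_equal_count_consecutive_N := by
  intro cmps i _hDom hPre
  obtain ⟨hlb, hlen, hdisj⟩ := hPre
  unfold Spec_count_consecutive_N count_consecutive_N count_consecutive_N_alt
  set cs := cmps.toList with hcs
  have hbridge : PySem.Str.pyGet? cmps i = PySem.List.pyGet? cs i := by
    simp only [PySem.Str.pyGet?_eq, PySem.Chars.pyGet?_eq_listPyGet?, ← hcs]
  rcases hp : PySem.List.pyGet? cs i with _ | c
  · rw [hbridge, hp]
  rw [hbridge, hp]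
  by_cases hc : c = 'N'
  · subst hc
    have h0 : 0 ≤ i := by
      rcases hdisj with h0 | hne
      · exact h0
      · exact absurd (hcs ▸ hp) hne
    have hiN : cs[i.toNat]? = some 'N' := by
      rw [PySem.List.pyGet?_of_nonneg cs h0] at hp
      exact hp
    simp only [ne_eq, not_true_eq_false, if_false]
    rw [pvRunScan_eq cs i h0 hlen hiN 0 0 le_rfl (by omega) (by omega)
      (fun m hm1 hm2 => absurd hm2 (by omega)) (Or.inl rfl)]
  · simp [hc]
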